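-- pv_equiv track=rewrite | github.com/Ericsson/codechecker | libcodechecker/analyze/analyzers/analyzer_types.py | gen_name_variations
-- ===== SOURCE A (Python) =====
-- def gen_name_variations(checkers):
--     """
--     Generate all applicable name variations from the given checker list.
--     """
--     checker_names = [name for name, _ in checkers]
--     reserved_names = []
--
--     for name in checker_names:
--         delim = '.' if '.' in name else '-'
--         parts = name.split(delim)
--         # Creates a list of variations from a checker name, e.g.
--         # ['security', 'security.insecureAPI', 'security.insecureAPI.gets']
--         # from 'security.insecureAPI.gets' or
--         # ['misc', 'misc-dangling', 'misc-dangling-handle']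
--         # from 'misc-dangling-handle'.
--         variations = [delim.join(parts[:(i + 1)]) for i in range(len(parts))]
--         reserved_names += variations
--
--     return reserved_names
-- ===== SOURCE B (Python) =====
-- def gen_name_variations(checkers):
--     """
--     Generate all applicable name variations from the given checker list.
--     """
--     reserved_names = []
--     for name, _ in checkers:
--         delim = '.' if '.' in name else '-'
--         prefix = None
--         for part in name.split(delim):
--             prefix = part if prefix is None else prefix + delim + part
--             reserved_names.append(prefix)
--     return reserved_names
-- ===== Notes on version B (the rewrite author's own statement) =====
-- stated objective: alternative
-- what changed: Replaces the per-index slice-and-rejoin comprehension (delim.join(parts[:i+1]) for each i) by a single running-prefix accumulator per name that extends the previous prefix with delim+part.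
import Mathlib
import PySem

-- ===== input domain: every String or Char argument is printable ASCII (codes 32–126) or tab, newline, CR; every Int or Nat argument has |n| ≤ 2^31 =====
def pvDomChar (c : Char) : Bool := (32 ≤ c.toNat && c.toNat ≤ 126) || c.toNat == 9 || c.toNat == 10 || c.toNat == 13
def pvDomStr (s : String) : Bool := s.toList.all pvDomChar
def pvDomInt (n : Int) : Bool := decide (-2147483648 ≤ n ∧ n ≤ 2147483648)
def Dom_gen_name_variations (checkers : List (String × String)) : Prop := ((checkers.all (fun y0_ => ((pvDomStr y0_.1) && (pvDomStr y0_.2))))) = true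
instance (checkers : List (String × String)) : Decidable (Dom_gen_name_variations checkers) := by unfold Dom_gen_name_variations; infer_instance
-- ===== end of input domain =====

-- B replaces A's per-prefix slice-and-rejoin by a single running-prefix accumulation per name (alternative decomposition, same result).

-- ===== PORT A =====
-- 'name.split(delim)': delim is always "." or "-" (nonempty), so split? is some; getD [] is never the fallback.
def gen_name_variations (checkers : List (String × String)) : List String :=
  let checker_names := checkers.map (fun p => p.1)
  checker_names.foldl
    (fun reserved_names name =>
      let delim := if PySem.Str.isIn "." name then "." else "-"
      let parts := (PySem.Str.split? name delim).getD []
      let variations := (PySem.List.pyRange 0 (parts.length : Int) 1).map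
        (fun i => PySem.Str.join delim (PySem.List.slice parts none (some (i + 1))))
      reserved_names ++ variations)
    []

-- ===== PORT B =====
-- inner loop state: (prefix : Option String  — Python's 'prefix', starting None, reserved_names so far)
def gen_name_variations_alt (checkers : List (String × String)) : List String :=
  checkers.foldl
    (fun reserved_names p =>
      let name := p.1
      let delim := if PySem.Str.isIn "." name then "." else "-"
      let st := ((PySem.Str.split? name delim).getD []).foldl
        (fun (st : Option String × List String) part =>
          let pref := match st.1 with
            | none => part
            | some pr => pr ++ delim ++ part
          (some pref, st.2 ++ [pref]))
        (none, reserved_names)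
      st.2)
    []

-- ===== PRECONDITION & SPEC =====
def Spec_gen_name_variations (checkers : List (String × String)) (out : List String) : Prop := out = gen_name_variations_alt checkers
instance (checkers : List (String × String)) (out : List String) : Decidable (Spec_gen_name_variations checkers out) := by unfold Spec_gen_name_variations; infer_instance

-- ===== CLAIM (what is proved, stated in full; the proofs are below) =====
def Claim_equal_gen_name_variations : Prop := ∀ (checkers : List (String × String)), Dom_gen_name_variations checkers → Spec_gen_name_variations checkers (gen_name_variations checkers)

-- ===== LEMMAS AND PROOFS =====

-- the list of running prefixes B produces from a first prefix `pref` and remaining parts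
def pvPrefixList (delim pref : String) : List String → List String
  | [] => []
  | x :: xs => (pref ++ delim ++ x) :: pvPrefixList delim (pref ++ delim ++ x) xs

theorem pv_join_singleton (sep p : String) : PySem.Str.join sep [p] = p := by
  apply String.toList_inj.mp
  simp [PySem.Str.toList_join, PySem.Chars.join_singleton]

theorem pv_join_shift (sep p x : String) (t : List String) :
    PySem.Str.join sep (p :: x :: t) = PySem.Str.join sep ((p ++ sep ++ x) :: t) := by
  apply String.toList_inj.mp
  cases t with
  | nil => simp [PySem.Str.toList_join, PySem.Chars.join_singleton, PySem.Chars.join_cons_cons]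
  | cons y t' =>
    simp [PySem.Str.toList_join, PySem.Chars.join_cons_cons, List.append_assoc]

-- A's comprehension, over parts = p :: rest, IS the list of running prefixes
theorem pv_variations_eq (delim : String) (rest : List String) (p : String) :
    (List.range (rest.length + 1)).map
        (fun k => PySem.Str.join delim ((p :: rest).take (k + 1)))
      = p :: pvPrefixList delim p rest := by
  induction rest generalizing p with
  | nil => simp [pv_join_singleton, pvPrefixList]
  | cons x xs ih =>
    rw [show (x :: xs).length + 1 = (xs.length + 1) + 1 from by simp, List.range_succ_eq_map]
    simp only [List.map_cons, List.map_map, pvPrefixList]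
    congr 1
    · simpa using pv_join_singleton delim p
    · have := ih (p ++ delim ++ x)
      rw [← this]
      apply List.map_congr_left
      intro k _
      simp only [Function.comp, Nat.succ_eq_add_one, List.take_succ_cons]
      exact pv_join_shift delim p x (xs.take k)

-- B's inner fold, started with some prefix, appends exactly the running prefixes
theorem pv_foldB_some (delim : String) (xs : List String) (pref : String) (rn : List String) :
    (xs.foldl
        (fun (st : Option String × List String) part =>
          let pr := match st.1 with
            | none => part
            | some pr => pr ++ delim ++ part
          (some pr, st.2 ++ [pr]))
        (some pref, rn)).2 = rn ++ pvPrefixList delim pref xs := by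
  induction xs generalizing pref rn with
  | nil => simp [pvPrefixList]
  | cons x t ih =>
    simp only [List.foldl_cons, pvPrefixList]
    rw [ih]
    simp

-- per-name step: A's appended variations = B's inner fold result
theorem pv_step_eq (delim : String) (parts rn : List String) :
    rn ++ (PySem.List.pyRange 0 (parts.length : Int) 1).map
        (fun i => PySem.Str.join delim (PySem.List.slice parts none (some (i + 1))))
      = (parts.foldl
          (fun (st : Option String × List String) part =>
            let pr := match st.1 with
              | none => part
              | some pr => pr ++ delim ++ part
            (some pr, st.2 ++ [pr]))
          (none, rn)).2 := by
  cases parts with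
  | nil => simp
  | cons p rest =>
    rw [PySem.List.pyRange_zero_nat, List.map_map]
    have hmap : ∀ k ∈ List.range (p :: rest).length,
        ((fun i => PySem.Str.join delim (PySem.List.slice (p :: rest) none (some (i + 1)))) ∘
          (fun k : Nat => (k : Int))) k
          = PySem.Str.join delim ((p :: rest).take (k + 1)) := by
      intro k _
      simp only [Function.comp]
      rw [show ((k : Int) + 1) = ((k + 1 : Nat) : Int) by push_cast; ring,
        PySem.List.slice_to_natCast]
    rw [List.map_congr_left hmap]
    simp only [List.length_cons, pv_variations_eq]
    simp only [List.foldl_cons, pv_foldB_some]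
    simp

-- ===== VERDICT (by name: the statement is the Claim_ definition above) =====
theorem gen_name_variations_spec : Claim_equal_gen_name_variations := by
  intro checkers _
  unfold Spec_gen_name_variations gen_name_variations gen_name_variations_alt
  rw [List.foldl_map]
  exact congrFun (congrFun (congrArg _ (funext fun rn => funext fun p => pv_step_eq _ _ rn)) _) _
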